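-- pv_equiv track=rewrite | github.com/DeShrike/AdventOfCode2019 | day3.py | MoveTo
-- ===== SOURCE A (Python) =====
-- def MoveTo(dist, x, y, goalx, goaly, dx, dy):
-- 	steps = 0
-- 	for i in range(0, dist):
-- 		x += dx
-- 		y += dy
-- 		steps += 1
-- 		if x == goalx and y == goaly:
-- 			break
--
-- 	return x, y, steps
-- ===== SOURCE B (Python) =====
-- def _div(a, b):
--     return a // b if a % b == 0 else None
--
-- def _hit(x, y, goalx, goaly, dx, dy):
--     if dx == 0 and dy == 0:
--         return 1 if (x == goalx and y == goaly) else None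
--     if dx == 0:
--         return _div(goaly - y, dy) if x == goalx else None
--     if dy == 0:
--         return _div(goalx - x, dx) if y == goaly else None
--     t = _div(goalx - x, dx)
--     if t is None or y + t * dy != goaly:
--         return None
--     return t
--
-- def MoveTo(dist, x, y, goalx, goaly, dx, dy):
--     if dist <= 0:
--         return x, y, 0
--     t = _hit(x, y, goalx, goaly, dx, dy)
--     steps = t if t is not None and 1 <= t <= dist else dist
--     return x + steps * dx, y + steps * dy, steps
-- ===== Notes on version B (the rewrite author's own statement) =====
-- stated objective: faster
-- what changed: Replaces the O(dist) step-by-step walk with an O(1) closed form: solve the linear equation for the unique step index where the position equals the goal (exact division, with zero-delta cases handled separately) and clamp it to [1, dist].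
import Mathlib
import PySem

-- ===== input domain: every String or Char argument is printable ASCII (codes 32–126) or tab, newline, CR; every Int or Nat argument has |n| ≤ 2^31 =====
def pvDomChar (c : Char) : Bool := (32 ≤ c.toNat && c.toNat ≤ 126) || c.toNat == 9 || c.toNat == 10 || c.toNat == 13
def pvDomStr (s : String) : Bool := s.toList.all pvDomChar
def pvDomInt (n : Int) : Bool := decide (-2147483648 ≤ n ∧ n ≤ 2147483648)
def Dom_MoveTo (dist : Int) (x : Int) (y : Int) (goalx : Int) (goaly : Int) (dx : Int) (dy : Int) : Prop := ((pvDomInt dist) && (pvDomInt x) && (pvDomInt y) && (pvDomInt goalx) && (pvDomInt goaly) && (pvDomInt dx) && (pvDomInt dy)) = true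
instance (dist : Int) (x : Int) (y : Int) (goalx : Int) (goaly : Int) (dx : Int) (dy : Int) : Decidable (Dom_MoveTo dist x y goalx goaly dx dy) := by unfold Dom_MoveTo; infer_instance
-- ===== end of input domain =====

-- B replaces A's O(dist) step-by-step walk by an O(1) closed form: solve for the unique step
-- index where the position equals the goal (division), clamp to [1, dist]; same return value.

-- ===== PORT A =====
-- the for-loop of A with break: one recursive call per iteration, same state (x, y, steps)
def MoveTo_loop (goalx goaly dx dy : Int) : Nat → Int → Int → Int → Int × Int × Int
  | 0, x, y, steps => (x, y, steps)
  | n + 1, x, y, steps =>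
    let x' := x + dx
    let y' := y + dy
    let steps' := steps + 1
    if x' = goalx ∧ y' = goaly then (x', y', steps')
    else MoveTo_loop goalx goaly dx dy n x' y' steps'

def MoveTo (dist : Int) (x : Int) (y : Int) (goalx : Int) (goaly : Int) (dx : Int) (dy : Int) : List Int :=
  -- range(0, dist) has dist.toNat iterations (empty when dist ≤ 0)
  let r := MoveTo_loop goalx goaly dx dy dist.toNat x y 0
  [r.1, r.2.1, r.2.2]

-- ===== PORT B =====
-- _div(a, b) = a // b if a % b == 0 else None  (only called with b ≠ 0)
def MoveTo_div (a b : Int) : Option Int :=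
  if PySem.Int.mod a b = 0 then some (PySem.Int.floordiv a b) else none

-- _hit: the step index t ≥ ... solving x + t*dx = goalx ∧ y + t*dy = goaly, if any
def MoveTo_hit (x y goalx goaly dx dy : Int) : Option Int :=
  if dx = 0 ∧ dy = 0 then (if x = goalx ∧ y = goaly then some 1 else none)
  else if dx = 0 then (if x = goalx then MoveTo_div (goaly - y) dy else none)
  else if dy = 0 then (if y = goaly then MoveTo_div (goalx - x) dx else none)
  else
    match MoveTo_div (goalx - x) dx with
    | none => none
    | some t => if y + t * dy ≠ goaly then none else some t

def MoveTo_alt (dist : Int) (x : Int) (y : Int) (goalx : Int) (goaly : Int) (dx : Int) (dy : Int) : List Int :=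
  if dist ≤ 0 then [x, y, 0]
  else
    let t := MoveTo_hit x y goalx goaly dx dy
    let steps :=
      match t with
      | some t => if 1 ≤ t ∧ t ≤ dist then t else dist
      | none => dist
    [x + steps * dx, y + steps * dy, steps]

-- ===== PRECONDITION & SPEC =====
def Spec_MoveTo (dist : Int) (x : Int) (y : Int) (goalx : Int) (goaly : Int) (dx : Int) (dy : Int) (out : List Int) : Prop := out = MoveTo_alt dist x y goalx goaly dx dy
instance (dist : Int) (x : Int) (y : Int) (goalx : Int) (goaly : Int) (dx : Int) (dy : Int) (out : List Int) : Decidable (Spec_MoveTo dist x y goalx goaly dx dy out) := by unfold Spec_MoveTo; infer_instance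

-- ===== CLAIM (what is proved, stated in full; the proofs are below) =====
def Claim_equal_MoveTo : Prop := ∀ (dist : Int) (x : Int) (y : Int) (goalx : Int) (goaly : Int) (dx : Int) (dy : Int), Dom_MoveTo dist x y goalx goaly dx dy → Spec_MoveTo dist x y goalx goaly dx dy (MoveTo dist x y goalx goaly dx dy)

-- ===== LEMMAS AND PROOFS =====

-- _div is exact division: some t ↔ t * b = a (b ≠ 0)
theorem MoveTo_div_some {a b t : Int} (hb : b ≠ 0) :
    MoveTo_div a b = some t ↔ t * b = a := by
  unfold MoveTo_div
  have hfm := PySem.Int.floordiv_mul_add_mod a b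
  constructor
  · intro h
    split at h
    · rename_i hm
      injection h with h
      subst h
      omega
    · simp at h
  · intro h
    have hdvd : b ∣ a := ⟨t, by rw [← h]; ring⟩
    have hm : PySem.Int.mod a b = 0 := (PySem.Int.mod_eq_zero_iff_dvd a b).2 hdvd
    rw [if_pos hm]
    have hfd : PySem.Int.floordiv a b * b = a := by omega
    exact congrArg some (mul_right_cancel₀ hb (hfd.trans h.symm))

-- soundness: a hit index really lands on the goal
theorem MoveTo_hit_sound {x y goalx goaly dx dy t : Int}
    (h : MoveTo_hit x y goalx goaly dx dy = some t) :
    x + t * dx = goalx ∧ y + t * dy = goaly := by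
  unfold MoveTo_hit at h
  by_cases h00 : dx = 0 ∧ dy = 0
  · rw [if_pos h00] at h
    by_cases hxy : x = goalx ∧ y = goaly
    · rw [if_pos hxy] at h
      injection h with h; subst h
      exact ⟨by simp [h00.1, hxy.1], by simp [h00.2, hxy.2]⟩
    · rw [if_neg hxy] at h; simp at h
  · rw [if_neg h00] at h
    by_cases hx0 : dx = 0
    · rw [if_pos hx0] at h
      by_cases hxg : x = goalx
      · rw [if_pos hxg] at h
        have hy0 : dy ≠ 0 := fun h' => h00 ⟨hx0, h'⟩
        have := (MoveTo_div_some hy0).1 h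
        exact ⟨by simp [hxg, hx0], by omega⟩
      · rw [if_neg hxg] at h; simp at h
    · rw [if_neg hx0] at h
      by_cases hy0 : dy = 0
      · rw [if_pos hy0] at h
        by_cases hyg : y = goaly
        · rw [if_pos hyg] at h
          have := (MoveTo_div_some hx0).1 h
          exact ⟨by omega, by simp [hyg, hy0]⟩
        · rw [if_neg hyg] at h; simp at h
      · rw [if_neg hy0] at h
        cases hd : MoveTo_div (goalx - x) dx with
        | none => simp only [hd] at h; simp at h
        | some t' =>
          simp only [hd] at h
          by_cases hne : y + t' * dy ≠ goaly
          · rw [if_pos hne] at h; simp at h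
          · rw [if_neg hne] at h
            injection h with h; subst h
            have := (MoveTo_div_some hx0).1 hd
            rw [not_not] at hne
            exact ⟨by omega, hne⟩

-- completeness: any goal-reaching step index t ≥ 1 yields a hit index t' ≤ t
theorem MoveTo_hit_complete {x y goalx goaly dx dy t : Int}
    (ht : 1 ≤ t) (hgx : x + t * dx = goalx) (hgy : y + t * dy = goaly) :
    ∃ t', MoveTo_hit x y goalx goaly dx dy = some t' ∧ 1 ≤ t' ∧ t' ≤ t := by
  unfold MoveTo_hit
  by_cases h00 : dx = 0 ∧ dy = 0
  · obtain ⟨e1, e2⟩ := h00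
    subst e1; subst e2
    simp only [mul_zero, add_zero] at hgx hgy
    refine ⟨1, ?_, le_refl 1, ht⟩
    simp [hgx, hgy]
  · by_cases hx0 : dx = 0
    · have hy0 : dy ≠ 0 := fun h' => h00 ⟨hx0, h'⟩
      subst hx0
      simp only [mul_zero, add_zero] at hgx
      refine ⟨t, ?_, ht, le_refl t⟩
      rw [if_neg h00, if_pos rfl, if_pos hgx]
      exact (MoveTo_div_some hy0).2 (by omega)
    · by_cases hy0 : dy = 0
      · subst hy0
        simp only [mul_zero, add_zero] at hgy
        refine ⟨t, ?_, ht, le_refl t⟩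
        rw [if_neg h00, if_neg hx0, if_pos rfl, if_pos hgy]
        exact (MoveTo_div_some hx0).2 (by omega)
      · refine ⟨t, ?_, ht, le_refl t⟩
        rw [if_neg h00, if_neg hx0, if_neg hy0]
        have hd : MoveTo_div (goalx - x) dx = some t := (MoveTo_div_some hx0).2 (by omega)
        rw [hd]
        simp [hgy]

-- uniqueness: away from the dx = dy = 0 case the hit index is the only solution
theorem MoveTo_hit_unique {x y goalx goaly dx dy t t' : Int}
    (hnz : ¬ (dx = 0 ∧ dy = 0))
    (h : MoveTo_hit x y goalx goaly dx dy = some t')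
    (hgx : x + t * dx = goalx) (hgy : y + t * dy = goaly) : t = t' := by
  have hs := MoveTo_hit_sound h
  by_cases hx0 : dx = 0
  · have hy0 : dy ≠ 0 := fun h' => hnz ⟨hx0, h'⟩
    have he : t * dy = t' * dy := by omega
    exact mul_right_cancel₀ hy0 he
  · have he : t * dx = t' * dx := by omega
    exact mul_right_cancel₀ hx0 he

-- loop characterisation, no hit in 1..n: the loop runs to the end
theorem MoveTo_loop_no_hit (goalx goaly dx dy : Int) :
    ∀ (n : Nat) (x y s : Int),
      (∀ t : Int, 1 ≤ t → t ≤ n → ¬(x + t * dx = goalx ∧ y + t * dy = goaly)) →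
      MoveTo_loop goalx goaly dx dy n x y s = (x + n * dx, y + n * dy, s + n) := by
  intro n
  induction n with
  | zero => intro x y s _; simp [MoveTo_loop]
  | succ n ih =>
    intro x y s h
    have h1 : ¬(x + dx = goalx ∧ y + dy = goaly) := by
      intro hc
      exact h 1 (by omega) (by omega)
        ⟨by rw [one_mul]; exact hc.1, by rw [one_mul]; exact hc.2⟩
    simp only [MoveTo_loop]
    rw [if_neg h1, ih (x + dx) (y + dy) (s + 1) ?_]
    · simp only [Prod.mk.injEq]
      refine ⟨by push_cast; ring, by push_cast; ring, by push_cast; ring⟩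
    · intro t ht1 htn hgoal
      refine h (t + 1) (by omega) (by omega)
        ⟨by rw [← hgoal.1]; ring, by rw [← hgoal.2]; ring⟩

-- loop characterisation, first hit at t0 ∈ [1, n]: the loop breaks there
theorem MoveTo_loop_hit (goalx goaly dx dy : Int) :
    ∀ (n : Nat) (x y s t0 : Int),
      1 ≤ t0 → t0 ≤ n →
      (x + t0 * dx = goalx ∧ y + t0 * dy = goaly) →
      (∀ t : Int, 1 ≤ t → t < t0 → ¬(x + t * dx = goalx ∧ y + t * dy = goaly)) →
      MoveTo_loop goalx goaly dx dy n x y s = (x + t0 * dx, y + t0 * dy, s + t0) := by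
  intro n
  induction n with
  | zero => intro x y s t0 h1 h2 _ _; exfalso; omega
  | succ n ih =>
    intro x y s t0 h1 h2 hg hmin
    by_cases hc : x + dx = goalx ∧ y + dy = goaly
    · have ht0 : t0 = 1 := by
        by_contra hne
        exact hmin 1 (by omega) (by omega)
          ⟨by rw [one_mul]; exact hc.1, by rw [one_mul]; exact hc.2⟩
      subst ht0
      simp only [MoveTo_loop]
      rw [if_pos hc]
      simp
    · have ht0 : 2 ≤ t0 := by
        rcases lt_or_ge t0 2 with hlt | hge
        · exfalso
          have : t0 = 1 := by omega
          subst this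
          exact hc ⟨by rw [← hg.1]; ring, by rw [← hg.2]; ring⟩
        · exact hge
      simp only [MoveTo_loop]
      rw [if_neg hc, ih (x + dx) (y + dy) (s + 1) (t0 - 1) (by omega)
        (by omega)
        ⟨by rw [← hg.1]; ring, by rw [← hg.2]; ring⟩ ?_]
      · simp only [Prod.mk.injEq]
        refine ⟨by ring, by ring, by ring⟩
      · intro t ht1 htlt hgoal
        exact hmin (t + 1) (by omega) (by omega)
          ⟨by rw [← hgoal.1]; ring, by rw [← hgoal.2]; ring⟩

-- ===== VERDICT (by name: the statement is the Claim_ definition above) =====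
theorem MoveTo_spec : Claim_equal_MoveTo := by
  unfold Claim_equal_MoveTo
  intro dist x y goalx goaly dx dy _
  simp only [Spec_MoveTo, MoveTo, MoveTo_alt]
  by_cases hd : dist ≤ 0
  · have h0 : dist.toNat = 0 := by omega
    rw [if_pos hd, h0]
    simp [MoveTo_loop]
  · have hcast : (dist.toNat : Int) = dist := by omega
    rw [if_neg hd]
    cases hh : MoveTo_hit x y goalx goaly dx dy with
    | none =>
      rw [MoveTo_loop_no_hit goalx goaly dx dy dist.toNat x y 0 ?_]
      · simp [hcast]
      · intro t ht1 htn hg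
        obtain ⟨t', ht', _, _⟩ := MoveTo_hit_complete ht1 hg.1 hg.2
        rw [hh] at ht'; simp at ht'
    | some t' =>
      have hs := MoveTo_hit_sound hh
      by_cases hr : 1 ≤ t' ∧ t' ≤ dist
      · have hmin : ∀ t : Int, 1 ≤ t → t < t' →
            ¬(x + t * dx = goalx ∧ y + t * dy = goaly) := by
          intro t ht1 htlt hg
          by_cases h00 : dx = 0 ∧ dy = 0
          · unfold MoveTo_hit at hh
            rw [if_pos h00] at hh
            by_cases hxy : x = goalx ∧ y = goaly
            · rw [if_pos hxy] at hh
              injection hh with hh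
              omega
            · rw [if_neg hxy] at hh; simp at hh
          · have := MoveTo_hit_unique h00 hh hg.1 hg.2; omega
        rw [MoveTo_loop_hit goalx goaly dx dy dist.toNat x y 0 t' hr.1
          (by rw [hcast]; exact hr.2) hs hmin]
        simp [hr]
      · rw [MoveTo_loop_no_hit goalx goaly dx dy dist.toNat x y 0 ?_]
        · simp [hcast, hr]
        · intro t ht1 htn hg
          rw [hcast] at htn
          obtain ⟨t'', ht'', h1'', h2''⟩ := MoveTo_hit_complete ht1 hg.1 hg.2
          rw [hh] at ht''
          injection ht'' with ht''
          subst ht''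
          exact hr ⟨h1'', by omega⟩
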